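-- pv_equiv track=rewrite | github.com/BxB-HUB/Program.Project | Discord-TokenGen/Token-Gen/gen.py | parse_ip_port_proxy
-- ===== SOURCE A (Python) =====
-- def parse_ip_port_proxy(proxy):
--     IP = ""
--     PORT = ""
--     colons = False
--     for character in proxy:
--         if character == ":":
--             colons = True
--         else:
--             if colons == False:
--                 IP += character
--             else:
--                 PORT += character
--     return IP, PORT
-- ===== SOURCE B (Python) =====
-- def parse_ip_port_proxy(proxy):
--     first, *rest = proxy.split(":")
--     return first, "".join(rest)
-- ===== Notes on version B (the rewrite author's own statement) =====
-- stated objective: idiomatic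
-- what changed: Replaces A's character-by-character state machine (colon flag, two string += accumulators) with a single split(":"), taking the first part as IP and joining the remaining parts as PORT.
import Mathlib
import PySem

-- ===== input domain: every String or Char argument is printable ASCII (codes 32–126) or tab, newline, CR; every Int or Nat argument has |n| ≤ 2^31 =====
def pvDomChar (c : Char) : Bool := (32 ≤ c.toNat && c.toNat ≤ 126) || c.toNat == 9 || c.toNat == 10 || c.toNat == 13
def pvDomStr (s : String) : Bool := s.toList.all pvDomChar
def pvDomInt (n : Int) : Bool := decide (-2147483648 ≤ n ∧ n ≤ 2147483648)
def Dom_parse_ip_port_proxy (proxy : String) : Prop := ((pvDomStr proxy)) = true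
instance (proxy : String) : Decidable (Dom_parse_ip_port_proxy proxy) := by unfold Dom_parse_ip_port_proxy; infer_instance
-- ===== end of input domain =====

-- B replaces A's character state machine with split-on-colon: first part is IP, the join of the rest is PORT (idiomatic).

-- ===== PORT A =====
-- loop state: IP and PORT accumulators (as char lists, += is append), colons flag
def pvGoA : List Char → List Char → List Char → Bool → String × String
  | [], ip, port, _ => (String.ofList ip, String.ofList port)
  | c :: cs, ip, port, colons =>
    if c = ':' then pvGoA cs ip port true
    else if colons = false then pvGoA cs (ip ++ [c]) port colons
    else pvGoA cs ip (port ++ [c]) colons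

def parse_ip_port_proxy (proxy : String) : String × String :=
  pvGoA proxy.toList [] [] false

-- ===== PORT B =====
-- proxy.split(":") with the nonempty literal separator is exactly PySem.Chars.splitOn on the code points;
-- split never returns an empty list, so the [] branch is unreachable
def parse_ip_port_proxy_alt (proxy : String) : String × String :=
  match PySem.Chars.splitOn proxy.toList [':'] with
  | [] => ("", "")
  | first :: rest => (String.ofList first, PySem.Str.join "" (rest.map String.ofList))

-- ===== PRECONDITION & SPEC =====
def Spec_parse_ip_port_proxy (proxy : String) (out : String × String) : Prop := out = parse_ip_port_proxy_alt proxy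
instance (proxy : String) (out : String × String) : Decidable (Spec_parse_ip_port_proxy proxy out) := by unfold Spec_parse_ip_port_proxy; infer_instance

-- ===== CLAIM (what is proved, stated in full; the proofs are below) =====
def Claim_equal_parse_ip_port_proxy : Prop := ∀ (proxy : String), Dom_parse_ip_port_proxy proxy → Spec_parse_ip_port_proxy proxy (parse_ip_port_proxy proxy)

-- ===== LEMMAS AND PROOFS =====

-- structural version of split-on-colon: (first part, remaining parts)
def pvSplitCol : List Char → List Char × List (List Char)
  | [] => ([], [])
  | c :: cs =>
    if c = ':' then ([], (pvSplitCol cs).1 :: (pvSplitCol cs).2)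
    else (c :: (pvSplitCol cs).1, (pvSplitCol cs).2)

-- A's loop after the first colon: every non-colon character is appended to PORT
theorem pvGoA_true (cs : List Char) : ∀ (ip port : List Char),
    pvGoA cs ip port true = (String.ofList ip, String.ofList (port ++ cs.filter (· ≠ ':'))) := by
  induction cs with
  | nil => intro ip port; simp [pvGoA]
  | cons c cs ih =>
    intro ip port
    by_cases hc : c = ':'
    · simp [pvGoA, hc, ih]
    · simp [pvGoA, hc, ih]

theorem pvFilter_eq (cs : List Char) :
    cs.filter (fun x => !decide (x = ':')) = (pvSplitCol cs).1 ++ (pvSplitCol cs).2.flatten := by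
  induction cs with
  | nil => simp [pvSplitCol]
  | cons c cs ih =>
    by_cases hc : c = ':'
    · simp [pvSplitCol, hc, ih]
    · simp [pvSplitCol, hc, ih]

theorem pvGoA_false (cs : List Char) : ∀ (ip : List Char),
    pvGoA cs ip [] false
      = (String.ofList (ip ++ (pvSplitCol cs).1), String.ofList ((pvSplitCol cs).2.flatten)) := by
  induction cs with
  | nil => intro ip; simp [pvGoA, pvSplitCol]
  | cons c cs ih =>
    intro ip
    by_cases hc : c = ':'
    · simp [pvGoA, hc, pvSplitCol, pvGoA_true, pvFilter_eq, String.ofList_append]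
    · simp [pvGoA, hc, pvSplitCol, ih]

theorem pvGo_eq (l : List Char) : ∀ (fuel : Nat) (acc : List (List Char)) (cur' : List Char),
    l.length + 1 ≤ fuel →
    PySem.Chars.splitOn.go [':'] fuel l cur' acc
      = acc.reverse ++ (cur'.reverse ++ (pvSplitCol l).1) :: (pvSplitCol l).2 := by
  induction l with
  | nil =>
    intro fuel acc cur' h
    obtain ⟨f, rfl⟩ : ∃ f, fuel = f + 1 := ⟨fuel - 1, by omega⟩
    simp [PySem.Chars.splitOn.go, pvSplitCol]
  | cons c cs ih =>
    intro fuel acc cur' h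
    obtain ⟨f, rfl⟩ : ∃ f, fuel = f + 1 := ⟨fuel - 1, by omega⟩
    by_cases hc : c = ':'
    · simp [PySem.Chars.splitOn.go, hc, List.isPrefixOf, pvSplitCol,
        ih f (cur'.reverse :: acc) [] (by simpa using Nat.le_of_succ_le_succ h)]
    · simp only [PySem.Chars.splitOn.go, List.isPrefixOf,
        Bool.and_true, beq_iff_eq]
      rw [if_neg (by simpa [eq_comm] using hc)]
      simp [pvSplitCol, hc, ih f acc (c :: cur') (by simpa using Nat.le_of_succ_le_succ h)]

theorem pvSplitOn_eq (cs : List Char) :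
    PySem.Chars.splitOn cs [':'] = (pvSplitCol cs).1 :: (pvSplitCol cs).2 := by
  simpa using pvGo_eq cs (cs.length + 1) [] [] (by omega)

theorem pvJoin_empty (rest : List (List Char)) :
    PySem.Str.join "" (rest.map String.ofList) = String.ofList rest.flatten := by
  unfold PySem.Str.join PySem.Chars.join
  congr 1
  simp only [List.intercalate, String.toList_empty]
  induction rest with
  | nil => simp
  | cons p ps ih =>
    cases ps with
    | nil => simp
    | cons q qs =>
      simp only [List.map_cons, List.intersperse_cons₂, List.flatten_cons] at *
      simp at ih ⊢
      simp [ih]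

-- ===== VERDICT (by name: the statement is the Claim_ definition above) =====
theorem parse_ip_port_proxy_spec : Claim_equal_parse_ip_port_proxy := by
  intro proxy _
  unfold Spec_parse_ip_port_proxy parse_ip_port_proxy parse_ip_port_proxy_alt
  rw [pvSplitOn_eq, pvGoA_false]
  simp [pvJoin_empty]
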